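-- pv_equiv track=rewrite | github.com/GabrielGausachs/Project_IPCV_UT | Utils/line_detection_BM.py | filter_goal_line_points
-- ===== SOURCE A (Python) =====
-- def filter_goal_line_points(centroids, max_x_dist=300, max_y_dist=50):
--     filtered_points = []
--     for i, pt1 in enumerate(centroids):
--         x1, y1 = pt1
--         for j, pt2 in enumerate(centroids):
--             if i != j:
--                 x2, y2 = pt2
--                 if abs(x1 - x2) <= max_x_dist and abs(y1 - y2) <= max_y_dist:
--                     filtered_points.append(pt1)
--                     break
--     return filtered_points
-- ===== SOURCE B (Python) =====
-- def filter_goal_line_points(centroids, max_x_dist=300, max_y_dist=50):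
--     # Symmetric pair sweep: each unordered pair is examined once; both endpoints
--     # of an in-box pair are marked good, then one pass keeps the marked points.
--     pts = list(enumerate(centroids))
--     good = set()
--     for a in range(len(pts)):
--         i, (x1, y1) = pts[a]
--         for j, (x2, y2) in pts[a + 1:]:
--             if abs(x1 - x2) <= max_x_dist and abs(y1 - y2) <= max_y_dist:
--                 good.add(i)
--                 good.add(j)
--     return [pt for k, pt in pts if k in good]
-- ===== Notes on version B (the rewrite author's own statement) =====
-- stated objective: alternative
-- what changed: Instead of A's per-point rescan of the whole list with a break, B examines each unordered pair once (triangular sweep), marks both endpoints of any in-box pair in a set, and emits the marked points in one final pass.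
import Mathlib
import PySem

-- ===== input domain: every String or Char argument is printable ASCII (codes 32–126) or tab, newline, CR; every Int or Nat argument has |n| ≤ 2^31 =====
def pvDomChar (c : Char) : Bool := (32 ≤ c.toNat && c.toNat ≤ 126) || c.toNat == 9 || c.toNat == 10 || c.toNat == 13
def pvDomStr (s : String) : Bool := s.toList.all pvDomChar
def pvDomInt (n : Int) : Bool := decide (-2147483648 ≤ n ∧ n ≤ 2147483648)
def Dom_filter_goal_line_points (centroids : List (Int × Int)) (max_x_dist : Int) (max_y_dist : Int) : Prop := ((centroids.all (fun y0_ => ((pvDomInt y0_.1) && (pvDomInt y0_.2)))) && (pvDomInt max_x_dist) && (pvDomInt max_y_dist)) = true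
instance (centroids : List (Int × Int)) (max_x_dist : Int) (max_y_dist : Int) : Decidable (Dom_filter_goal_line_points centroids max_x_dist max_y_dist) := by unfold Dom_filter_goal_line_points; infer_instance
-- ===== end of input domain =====

-- B replaces A's per-point full rescan (with break) by a single triangular sweep over
-- unordered pairs that marks both endpoints of each in-box pair in a set (alternative
-- decomposition, same asymptotic cost).


-- ===== PORT A =====
-- inner 'for j, pt2 …: if i != j: if in-box: append pt1; break' = first-hit search
def pvFindNbr (i x1 y1 dx dy : Int) : List (Int × (Int × Int)) → Bool
  | [] => false
  | (j, pt2) :: rest =>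
    if i ≠ j then
      if |x1 - pt2.1| ≤ dx ∧ |y1 - pt2.2| ≤ dy then true
      else pvFindNbr i x1 y1 dx dy rest
    else pvFindNbr i x1 y1 dx dy rest

def filter_goal_line_points (centroids : List (Int × Int)) (max_x_dist : Int) (max_y_dist : Int) : List (Int × Int) :=
  (PySem.List.enumerate centroids).foldl
    (fun acc ip =>
      if pvFindNbr ip.1 ip.2.1 ip.2.2 max_x_dist max_y_dist (PySem.List.enumerate centroids)
      then acc ++ [ip.2] else acc) []

-- ===== PORT B =====
-- inner 'for j, (x2, y2) in pts[a + 1:]' marking both endpoints of an in-box pair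
def pvMarkRow (i x1 y1 dx dy : Int) (rest : List (Int × (Int × Int))) (good : PySem.Set Int) : PySem.Set Int :=
  match rest with
  | [] => good
  | (j, pt2) :: t =>
    pvMarkRow i x1 y1 dx dy t
      (if |x1 - pt2.1| ≤ dx ∧ |y1 - pt2.2| ≤ dy
       then PySem.Set.add (PySem.Set.add good i) j else good)

-- outer 'for a in range(len(pts))' walking the tails of pts
def pvMarkAll (dx dy : Int) : List (Int × (Int × Int)) → PySem.Set Int → PySem.Set Int
  | [], good => good
  | (i, pt1) :: t, good => pvMarkAll dx dy t (pvMarkRow i pt1.1 pt1.2 dx dy t good)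

def filter_goal_line_points_alt (centroids : List (Int × Int)) (max_x_dist : Int) (max_y_dist : Int) : List (Int × Int) :=
  let pts := PySem.List.enumerate centroids
  let good := pvMarkAll max_x_dist max_y_dist pts PySem.Set.empty
  (pts.filter (fun kp => PySem.Set.contains good kp.1)).map (fun kp => kp.2)

-- ===== PRECONDITION & SPEC =====
def Spec_filter_goal_line_points (centroids : List (Int × Int)) (max_x_dist : Int) (max_y_dist : Int) (out : List (Int × Int)) : Prop := out = filter_goal_line_points_alt centroids max_x_dist max_y_dist
instance (centroids : List (Int × Int)) (max_x_dist : Int) (max_y_dist : Int) (out : List (Int × Int)) : Decidable (Spec_filter_goal_line_points centroids max_x_dist max_y_dist out) := by unfold Spec_filter_goal_line_points; infer_instance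

-- ===== CLAIM (what is proved, stated in full; the proofs are below) =====
def Claim_equal_filter_goal_line_points : Prop := ∀ (centroids : List (Int × Int)) (max_x_dist : Int) (max_y_dist : Int), Dom_filter_goal_line_points centroids max_x_dist max_y_dist → Spec_filter_goal_line_points centroids max_x_dist max_y_dist (filter_goal_line_points centroids max_x_dist max_y_dist)

-- ===== LEMMAS AND PROOFS =====

theorem pvFindNbr_iff (i x1 y1 dx dy : Int) (l : List (Int × (Int × Int))) :
    pvFindNbr i x1 y1 dx dy l = true ↔
      ∃ jq ∈ l, i ≠ jq.1 ∧ |x1 - jq.2.1| ≤ dx ∧ |y1 - jq.2.2| ≤ dy := by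
  induction l with
  | nil => simp [pvFindNbr]
  | cons hd tl ih =>
    obtain ⟨j, pt2⟩ := hd
    simp only [pvFindNbr]
    split_ifs with h1 h2
    · simp only [true_iff]
      exact ⟨(j, pt2), by simp, h1, h2⟩
    · rw [ih]
      constructor
      · rintro ⟨jq, hm, h⟩; exact ⟨jq, by simp [hm], h⟩
      · rintro ⟨jq, hm, h⟩
        rcases List.mem_cons.1 hm with rfl | hm
        · exact absurd h.2 h2
        · exact ⟨jq, hm, h⟩
    · rw [ih]
      constructor
      · rintro ⟨jq, hm, h⟩; exact ⟨jq, by simp [hm], h⟩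
      · rintro ⟨jq, hm, h⟩
        rcases List.mem_cons.1 hm with rfl | hm
        · exact absurd (not_not.1 h1) h.1
        · exact ⟨jq, hm, h⟩

theorem mem_pvMarkRow (k i x1 y1 dx dy : Int) (rest : List (Int × (Int × Int))) (good : PySem.Set Int) :
    k ∈ pvMarkRow i x1 y1 dx dy rest good ↔
      k ∈ good ∨ ∃ jq ∈ rest, (|x1 - jq.2.1| ≤ dx ∧ |y1 - jq.2.2| ≤ dy) ∧ (k = i ∨ k = jq.1) := by
  induction rest generalizing good with
  | nil => simp [pvMarkRow]
  | cons hd tl ih =>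
    obtain ⟨j, pt2⟩ := hd
    simp only [pvMarkRow]
    rw [ih]
    split_ifs with hb
    · rw [PySem.Set.mem_add, PySem.Set.mem_add]
      constructor
      · rintro (((h | h) | h) | ⟨jq, hm, h⟩)
        · exact Or.inl h
        · exact Or.inr ⟨(j, pt2), by simp, hb, Or.inl h⟩
        · exact Or.inr ⟨(j, pt2), by simp, hb, Or.inr h⟩
        · exact Or.inr ⟨jq, by simp [hm], h⟩
      · rintro (h | ⟨jq, hm, h⟩)
        · exact Or.inl (Or.inl (Or.inl h))
        · rcases List.mem_cons.1 hm with rfl | hm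
          · rcases h.2 with h2 | h2
            · exact Or.inl (Or.inl (Or.inr h2))
            · exact Or.inl (Or.inr h2)
          · exact Or.inr ⟨jq, hm, h⟩
    · constructor
      · rintro (h | ⟨jq, hm, h⟩)
        · exact Or.inl h
        · exact Or.inr ⟨jq, by simp [hm], h⟩
      · rintro (h | ⟨jq, hm, h⟩)
        · exact Or.inl h
        · rcases List.mem_cons.1 hm with rfl | hm
          · exact absurd h.1 hb
          · exact Or.inr ⟨jq, hm, h⟩

-- the pairs reachable by B's triangular sweep: an ordered (by position) pair of l
def pvPairGood (dx dy : Int) (l : List (Int × (Int × Int))) (k : Int) : Prop :=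
  ∃ ip jq : Int × (Int × Int), [ip, jq].Sublist l ∧
    (|ip.2.1 - jq.2.1| ≤ dx ∧ |ip.2.2 - jq.2.2| ≤ dy) ∧ (k = ip.1 ∨ k = jq.1)

theorem mem_pvMarkAll (k dx dy : Int) (l : List (Int × (Int × Int))) (good : PySem.Set Int) :
    k ∈ pvMarkAll dx dy l good ↔ k ∈ good ∨ pvPairGood dx dy l k := by
  induction l generalizing good with
  | nil =>
    simp only [pvMarkAll, pvPairGood]
    constructor
    · exact Or.inl
    · rintro (h | ⟨ip, jq, hs, _⟩)
      · exact h
      · exact absurd hs.length_le (by simp)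
  | cons hd tl ih =>
    obtain ⟨i, pt1⟩ := hd
    simp only [pvMarkAll]
    rw [ih, mem_pvMarkRow]
    constructor
    · rintro ((h | ⟨jq, hm, hb, hk⟩) | ⟨ip, jq, hs, hb, hk⟩)
      · exact Or.inl h
      · refine Or.inr ⟨(i, pt1), jq, ?_, hb, hk⟩
        exact List.Sublist.cons₂ _ (List.singleton_sublist.2 hm)
      · exact Or.inr ⟨ip, jq, hs.cons _, hb, hk⟩
    · rintro (h | ⟨ip, jq, hs, hb, hk⟩)
      · exact Or.inl (Or.inl h)
      · cases hs with
        | cons _ h => exact Or.inr ⟨ip, jq, h, hb, hk⟩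
        | cons₂ _ h =>
          exact Or.inl (Or.inr ⟨jq, List.singleton_sublist.1 h, hb, hk⟩)

theorem enum_idx_ge {α : Type} (c : List α) (s i : Int) (p : α)
    (h : (i, p) ∈ PySem.List.enumerate c s) : s ≤ i := by
  rw [PySem.List.mem_enumerate_iff] at h
  obtain ⟨a, ha, hp⟩ := h
  have : i = s + a := by exact congrArg Prod.fst hp
  omega

theorem enum_val_unique {α : Type} (c : List α) (s i : Int) (p q : α)
    (hp : (i, p) ∈ PySem.List.enumerate c s) (hq : (i, q) ∈ PySem.List.enumerate c s) : p = q := by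
  rw [PySem.List.mem_enumerate_iff] at hp hq
  obtain ⟨a, ha, hpa⟩ := hp
  obtain ⟨b, hb, hqb⟩ := hq
  have hfa : i = s + a := congrArg Prod.fst hpa
  have hfb : i = s + b := congrArg Prod.fst hqb
  have hab : a = b := by omega
  subst hab
  have h3 : (i, p) = (i, q) := hpa.trans hqb.symm
  injection h3

theorem enum_pair_sublist {α : Type} (c : List α) (s : Int) (ip jq : Int × α)
    (hi : ip ∈ PySem.List.enumerate c s) (hj : jq ∈ PySem.List.enumerate c s)
    (hlt : ip.1 < jq.1) : [ip, jq].Sublist (PySem.List.enumerate c s) := by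
  induction c generalizing s with
  | nil => simp [PySem.List.enumerate] at hi
  | cons x t ih =>
    rw [PySem.List.enumerate_cons] at hi hj ⊢
    have hjt : jq ∈ PySem.List.enumerate t (s + 1) := by
      rcases List.mem_cons.1 hj with rfl | h
      · exfalso
        have := enum_idx_ge (x :: t) s ip.1 ip.2 (by rw [PySem.List.enumerate_cons]; simpa using hi)
        simp at hlt; omega
      · exact h
    rcases List.mem_cons.1 hi with rfl | hit
    · exact List.Sublist.cons₂ _ (List.singleton_sublist.2 hjt)
    · exact (ih (s + 1) hit hjt).cons _
  
theorem enum_pairwise_lt {α : Type} (c : List α) (s : Int) (ip jq : Int × α)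
    (h : [ip, jq].Sublist (PySem.List.enumerate c s)) : ip.1 < jq.1 := by
  have hpw := (PySem.List.pairwise_lt_enumerate (xs := c) (s := s)).sublist h
  simpa using hpw

theorem good_iff (centroids : List (Int × Int)) (dx dy : Int) (k : Int) (p : Int × Int)
    (hk : (k, p) ∈ PySem.List.enumerate centroids 0) :
    (pvFindNbr k p.1 p.2 dx dy (PySem.List.enumerate centroids 0) = true) ↔
      pvPairGood dx dy (PySem.List.enumerate centroids 0) k := by
  rw [pvFindNbr_iff]
  constructor
  · rintro ⟨⟨j, q⟩, hm, hne, hbx, hby⟩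
    rcases lt_trichotomy k j with hlt | rfl | hgt
    · exact ⟨(k, p), (j, q), enum_pair_sublist _ _ _ _ hk hm hlt, ⟨hbx, hby⟩, Or.inl rfl⟩
    · exact absurd rfl hne
    · refine ⟨(j, q), (k, p), enum_pair_sublist _ _ _ _ hm hk hgt, ⟨?_, ?_⟩, Or.inr rfl⟩
      · simpa [abs_sub_comm] using hbx
      · simpa [abs_sub_comm] using hby
  · rintro ⟨ip, jq, hs, ⟨hbx, hby⟩, hk' | hk'⟩
    · have hjm : jq ∈ PySem.List.enumerate centroids 0 := hs.subset (by simp)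
      have him : ip ∈ PySem.List.enumerate centroids 0 := hs.subset (by simp)
      have hlt := enum_pairwise_lt _ _ _ _ hs
      have hp : ip.2 = p := by
        subst hk'
        exact enum_val_unique _ _ _ _ _ (by simpa using him) hk
      refine ⟨jq, hjm, by omega, ?_, ?_⟩
      · rw [← hp]; exact hbx
      · rw [← hp]; exact hby
    · have hjm : jq ∈ PySem.List.enumerate centroids 0 := hs.subset (by simp)
      have him : ip ∈ PySem.List.enumerate centroids 0 := hs.subset (by simp)
      have hlt := enum_pairwise_lt _ _ _ _ hs
      have hp : jq.2 = p := by
        subst hk'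
        exact enum_val_unique _ _ _ _ _ (by simpa using hjm) hk
      refine ⟨ip, him, by omega, ?_, ?_⟩
      · rw [← hp]; simpa [abs_sub_comm] using hbx
      · rw [← hp]; simpa [abs_sub_comm] using hby

-- ===== VERDICT (by name: the statement is the Claim_ definition above) =====
theorem filter_goal_line_points_spec : Claim_equal_filter_goal_line_points := by
  intro centroids dx dy _
  unfold Spec_filter_goal_line_points filter_goal_line_points filter_goal_line_points_alt
  rw [PySem.List.foldl_append_if]
  simp only [List.nil_append]
  congr 1
  apply List.filter_congr
  intro kp hkp
  obtain ⟨k, p⟩ := kp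
  have h1 := good_iff centroids dx dy k p hkp
  have h2 := mem_pvMarkAll k dx dy (PySem.List.enumerate centroids) PySem.Set.empty
  rw [Bool.eq_iff_iff, h1, PySem.Set.contains_iff]
  rw [show ((k, p).1 : Int) = k from rfl, h2]
  simp [PySem.Set.empty]
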